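-- pv_equiv track=rewrite | github.com/lchristie/Sums-of-Roots-of-Unity | support.py | subtractSorous
-- ===== SOURCE A (Python) =====
-- def gcd(a, b):
--     while b:
--         a, b = b, a % b
--     return a
--
-- def simplifyRoot (aOmega, aPower):
--     tempOmega = aOmega
--     tempPower = aPower % aOmega
--
--     newOmega = tempOmega // gcd(tempOmega, tempPower)
--     newPower = tempPower // gcd(tempOmega, tempPower)
--
--     return [newOmega, newPower]
--
-- def multiplyRoots (aOmega1, aPower1, aOmega2, aPower2):
--     tempOmega = aOmega1 * aOmega2
--     tempPower = aPower1 * aOmega2 + aOmega1 * aPower2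
--     return simplifyRoot(tempOmega, tempPower)
--
-- def rotate (aSorou, aOmega, aPower):
--     output = []
--     for item in aSorou:
--         output.append(multiplyRoots(item[0],item[1],aOmega,aPower))
--     return output
--
-- def orderRoots (root1, root2):
--     if root1[0] > root2[0]:
--         return 1
--     elif root2[0] > root1[0]:
--         return 2
--     elif root1[1] > root2[1]:
--         return 1
--     elif root2[1] > root1[1]:
--         return 2
--     else:
--         return 0
--
-- def ssort (aSorou):
--     tempSorou = []
--     for root in aSorou:
--         tempSorou.append(simplifyRoot(root[0],root[1]))
--     return sorted(tempSorou, key=lambda tup: (tup[0],tup[1]) )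
--
-- def subtractSorous (Sorou1, Sorou2):
--     '''
--     returns sorou1 - sorou2
--     '''
--     output = []
--     sumand = ssort(Sorou1)
--     negand = ssort(Sorou2)
--
--     index1 = 0
--     index2 = 0
--
--     tempSumand = []
--     tempNegand = []
--
--     while index1 < len(sumand) and index2 < len(negand):
--         root1 = sumand[index1]
--         root2 = negand[index2]
--
--         tester = orderRoots(root1, root2)
--         if tester == 0:
--             index1 += 1
--             index2 += 1
--         elif tester == 1:
--             tempNegand.append(root2)
--             index2 += 1
--         else:
--             tempSumand.append(root1)
--             index1 += 1
--
--     if index1 < len(sumand):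
--         tempSumand += sumand[index1:]
--     if index2 < len(negand):
--         tempNegand += negand[index2:]
--
--     output += tempSumand
--     output += rotate(tempNegand, 2, 1)
--
--     return output
-- ===== SOURCE B (Python) =====
-- def subtractSorous(Sorou1, Sorou2):
--     def simp(o, p):
--         p = p % o
--         a, b = o, p
--         while b:
--             a, b = b, a % b
--         return (o // a, p // a)
--     s = sorted(simp(r[0], r[1]) for r in Sorou1)
--     n = sorted(simp(r[0], r[1]) for r in Sorou2)
--     rem = list(n)
--     left = []
--     for x in s:
--         if x in rem:
--             rem.remove(x)
--         else:
--             left.append(x)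
--     return [[o, p] for (o, p) in left] + [list(simp(o * 2, p * 2 + o)) for (o, p) in rem]
-- ===== Notes on version B (the rewrite author's own statement) =====
-- stated objective: simpler
-- what changed: B replaces A's index-based two-pointer merge over the two sorted simplified root lists (plus trailing-slice handling) by a single pass that cancels each root of Sorou1 against the first matching remaining root of Sorou2 via membership-test-and-remove, then emits the survivors of both sides.
import Mathlib
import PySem

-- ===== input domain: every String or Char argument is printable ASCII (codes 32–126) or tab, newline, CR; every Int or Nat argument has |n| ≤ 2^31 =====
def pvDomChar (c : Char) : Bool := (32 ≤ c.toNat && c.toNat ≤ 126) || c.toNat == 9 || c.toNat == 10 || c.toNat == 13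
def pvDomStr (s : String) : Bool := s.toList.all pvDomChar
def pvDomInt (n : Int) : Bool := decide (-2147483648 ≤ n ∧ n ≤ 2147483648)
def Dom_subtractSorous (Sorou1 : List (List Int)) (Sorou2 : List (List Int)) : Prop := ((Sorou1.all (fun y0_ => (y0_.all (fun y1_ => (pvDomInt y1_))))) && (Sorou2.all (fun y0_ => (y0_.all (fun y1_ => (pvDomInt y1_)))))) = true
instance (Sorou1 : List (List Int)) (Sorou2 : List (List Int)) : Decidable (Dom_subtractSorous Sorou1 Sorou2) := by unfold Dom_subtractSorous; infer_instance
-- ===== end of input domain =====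

-- B replaces A's two-pointer merge over the two sorted root lists by a plain remove-first-match
-- difference (objective: simpler); the proof shows both compute the two-sided multiset difference.

-- termination helper for the gcd loops (cited by pyGcd/altGcd)
theorem pvModAbsLt (a b : Int) (hb : ¬ b = 0) : (PySem.Int.mod a b).natAbs < b.natAbs := by
  rcases lt_or_gt_of_ne hb with h | h
  · have := PySem.Int.mod_neg_bounds a h; omega
  · have h1 := PySem.Int.mod_nonneg a h
    have h2 := PySem.Int.mod_lt a h; omega

-- ===== PORT A =====
def pyGcd (a b : Int) : Int :=
  if hb : b = 0 then a else pyGcd b (PySem.Int.mod a b)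
termination_by b.natAbs
decreasing_by exact pvModAbsLt a b hb

def simplifyRoot (aOmega aPower : Int) : List Int :=
  let tempOmega := aOmega
  let tempPower := PySem.Int.mod aPower aOmega
  let newOmega := PySem.Int.floordiv tempOmega (pyGcd tempOmega tempPower)
  let newPower := PySem.Int.floordiv tempPower (pyGcd tempOmega tempPower)
  [newOmega, newPower]

def multiplyRoots (aOmega1 aPower1 aOmega2 aPower2 : Int) : List Int :=
  simplifyRoot (aOmega1 * aOmega2) (aPower1 * aOmega2 + aOmega1 * aPower2)

def rotate (aSorou : List (List Int)) (aOmega aPower : Int) : List (List Int) :=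
  aSorou.map (fun item =>
    multiplyRoots (PySem.List.pyGetD item 0 0) (PySem.List.pyGetD item 1 0) aOmega aPower)

def orderRoots (root1 root2 : List Int) : Int :=
  if PySem.List.pyGetD root1 0 0 > PySem.List.pyGetD root2 0 0 then 1
  else if PySem.List.pyGetD root2 0 0 > PySem.List.pyGetD root1 0 0 then 2
  else if PySem.List.pyGetD root1 1 0 > PySem.List.pyGetD root2 1 0 then 1
  else if PySem.List.pyGetD root2 1 0 > PySem.List.pyGetD root1 1 0 then 2
  else 0

def ssort (aSorou : List (List Int)) : List (List Int) :=
  PySem.List.sorted2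
    (aSorou.map (fun root => simplifyRoot (PySem.List.pyGetD root 0 0) (PySem.List.pyGetD root 1 0)))
    (fun r => PySem.List.pyGetD r 0 0) (fun r => PySem.List.pyGetD r 1 0)

-- the while loop of subtractSorous, as structural recursion on the two suffixes
-- (the trailing "+= sumand[index1:]" / "+= negand[index2:]" are the base cases)
def subLoopA (sumand negand tempSumand tempNegand : List (List Int)) :
    List (List Int) × List (List Int) :=
  match sumand, negand with
  | [], n => (tempSumand, tempNegand ++ n)
  | s, [] => (tempSumand ++ s, tempNegand)
  | root1 :: s, root2 :: n =>
    let tester := orderRoots root1 root2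
    if tester = 0 then subLoopA s n tempSumand tempNegand
    else if tester = 1 then subLoopA (root1 :: s) n tempSumand (tempNegand ++ [root2])
    else subLoopA s (root2 :: n) (tempSumand ++ [root1]) tempNegand
termination_by sumand.length + negand.length
decreasing_by all_goals simp only [List.length_cons]; omega

def subtractSorous (Sorou1 : List (List Int)) (Sorou2 : List (List Int)) : List (List Int) :=
  let sumand := ssort Sorou1
  let negand := ssort Sorou2
  let r := subLoopA sumand negand [] []
  r.1 ++ rotate r.2 2 1

-- ===== PORT B =====
def altGcd (a b : Int) : Int :=
  if hb : b = 0 then a else altGcd b (PySem.Int.mod a b)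
termination_by b.natAbs
decreasing_by exact pvModAbsLt a b hb

def altSimp (o p : Int) : Int × Int :=
  let p' := PySem.Int.mod p o
  let g := altGcd o p'
  (PySem.Int.floordiv o g, PySem.Int.floordiv p' g)

def subtractSorous_alt (Sorou1 : List (List Int)) (Sorou2 : List (List Int)) : List (List Int) :=
  let s := PySem.List.sorted2
    (Sorou1.map (fun r => altSimp (PySem.List.pyGetD r 0 0) (PySem.List.pyGetD r 1 0)))
    Prod.fst Prod.snd
  let n := PySem.List.sorted2
    (Sorou2.map (fun r => altSimp (PySem.List.pyGetD r 0 0) (PySem.List.pyGetD r 1 0)))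
    Prod.fst Prod.snd
  let st := s.foldl
    (fun (st : List (Int × Int) × List (Int × Int)) x =>
      if st.1.contains x then (st.1.erase x, st.2) else (st.1, st.2 ++ [x]))
    (n, [])
  st.2.map (fun q => [q.1, q.2])
    ++ st.1.map (fun q => let q' := altSimp (q.1 * 2) (q.2 * 2 + q.1); [q'.1, q'.2])

-- ===== PRECONDITION & SPEC =====
-- Pre_ excludes exactly the inputs where the Python A raises: a root shorter than two
-- entries (IndexError on root[1]) or a root with omega == 0 (ZeroDivisionError in '% aOmega').
def Pre_subtractSorous (Sorou1 : List (List Int)) (Sorou2 : List (List Int)) : Prop :=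
  ∀ r ∈ Sorou1 ++ Sorou2, 2 ≤ r.length ∧ PySem.List.pyGetD r 0 0 ≠ 0
instance (Sorou1 : List (List Int)) (Sorou2 : List (List Int)) : Decidable (Pre_subtractSorous Sorou1 Sorou2) := by unfold Pre_subtractSorous; infer_instance
def pvWitness_subtractSorous : List (List Int) × List (List Int) := ([[3, 1], [3, 1], [2, 1]], [[6, 2]])

def Spec_subtractSorous (Sorou1 : List (List Int)) (Sorou2 : List (List Int)) (out : List (List Int)) : Prop := out = subtractSorous_alt Sorou1 Sorou2
instance (Sorou1 : List (List Int)) (Sorou2 : List (List Int)) (out : List (List Int)) : Decidable (Spec_subtractSorous Sorou1 Sorou2 out) := by unfold Spec_subtractSorous; infer_instance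

-- ===== CLAIM (what is proved, stated in full; the proofs are below) =====
def Claim_equal_subtractSorous : Prop := ∀ (Sorou1 : List (List Int)) (Sorou2 : List (List Int)), Dom_subtractSorous Sorou1 Sorou2 → Pre_subtractSorous Sorou1 Sorou2 → Spec_subtractSorous Sorou1 Sorou2 (subtractSorous Sorou1 Sorou2)

-- ===== LEMMAS AND PROOFS =====

theorem altGcd_eq_pyGcd (a b : Int) : altGcd a b = pyGcd a b := by
  fun_induction pyGcd a b with
  | case1 a => unfold altGcd; simp
  | case2 a b hb ih => unfold altGcd; rw [dif_neg hb, ih]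

def pvToRoot (q : Int × Int) : List Int := [q.1, q.2]

theorem simplifyRoot_eq (o p : Int) : simplifyRoot o p = pvToRoot (altSimp o p) := by
  unfold simplifyRoot altSimp pvToRoot
  simp [altGcd_eq_pyGcd]

theorem pyGetD_pair_zero (q : Int × Int) : PySem.List.pyGetD [q.1, q.2] 0 0 = q.1 := rfl
theorem pyGetD_pair_one (q : Int × Int) : PySem.List.pyGetD [q.1, q.2] 1 0 = q.2 := rfl

@[simp] theorem insertBy_nil {α : Type} (bef : α → α → Bool) (x : α) :
    PySem.List.insertBy bef x [] = [x] := rfl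
@[simp] theorem insertBy_cons {α : Type} (bef : α → α → Bool) (x y : α) (ys : List α) :
    PySem.List.insertBy bef x (y :: ys) =
      if bef x y then x :: y :: ys else y :: PySem.List.insertBy bef x ys := rfl

theorem insertBy_map {α β : Type} (f : α → β) (bef : β → β → Bool) (bef' : α → α → Bool)
    (h : ∀ x y, bef (f x) (f y) = bef' x y) (x : α) (acc : List α) :
    PySem.List.insertBy bef (f x) (acc.map f) = (PySem.List.insertBy bef' x acc).map f := by
  induction acc with
  | nil => simp
  | cons y ys ih =>
    simp only [List.map_cons, insertBy_cons, h]
    by_cases hb : bef' x y <;> simp [hb, ih]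

theorem foldl_insertBy_map {α β : Type} (f : α → β) (bef : β → β → Bool) (bef' : α → α → Bool)
    (h : ∀ x y, bef (f x) (f y) = bef' x y) (l : List α) (acc : List α) :
    (l.map f).foldl (fun acc x => PySem.List.insertBy bef x acc) (acc.map f)
      = (l.foldl (fun acc x => PySem.List.insertBy bef' x acc) acc).map f := by
  induction l generalizing acc with
  | nil => simp
  | cons x xs ih =>
    simp only [List.map_cons, List.foldl_cons]
    rw [insertBy_map f bef bef' h, ih]

theorem ssort_eq (S : List (List Int)) :
    ssort S = (PySem.List.sorted2
        (S.map (fun r => altSimp (PySem.List.pyGetD r 0 0) (PySem.List.pyGetD r 1 0)))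
        Prod.fst Prod.snd).map pvToRoot := by
  unfold ssort PySem.List.sorted2
  simp only [Bool.false_eq_true, if_false]
  have hmap : S.map (fun root => simplifyRoot (PySem.List.pyGetD root 0 0) (PySem.List.pyGetD root 1 0))
      = (S.map (fun r => altSimp (PySem.List.pyGetD r 0 0) (PySem.List.pyGetD r 1 0))).map pvToRoot := by
    rw [List.map_map]
    exact List.map_congr_left (fun r _ => simplifyRoot_eq _ _)
  rw [hmap]
  have := foldl_insertBy_map (acc := []) pvToRoot
    (fun a b => decide (PySem.List.pyGetD a 0 0 < PySem.List.pyGetD b 0 0) ||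
      !decide (PySem.List.pyGetD b 0 0 < PySem.List.pyGetD a 0 0) &&
        decide (PySem.List.pyGetD a 1 0 < PySem.List.pyGetD b 1 0))
    (fun a b => decide (a.1 < b.1) || !decide (b.1 < a.1) && decide (a.2 < b.2))
    (by intro x y; rfl)
    (S.map (fun r => altSimp (PySem.List.pyGetD r 0 0) (PySem.List.pyGetD r 1 0)))
  simpa using this

def pvLe (a b : Int × Int) : Prop := a.1 < b.1 ∨ (a.1 = b.1 ∧ a.2 ≤ b.2)

def pvBef (a b : Int × Int) : Bool :=
  decide (a.1 < b.1) || !decide (b.1 < a.1) && decide (a.2 < b.2)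

theorem pvLe_trans {a b c : Int × Int} (h1 : pvLe a b) (h2 : pvLe b c) : pvLe a c := by
  unfold pvLe at *; omega

theorem pvBef_le {a b : Int × Int} (h : pvBef a b = true) : pvLe a b := by
  simp [pvBef] at h; unfold pvLe; omega

theorem pvBef_not_le {a b : Int × Int} (h : ¬ pvBef a b = true) : pvLe b a := by
  simp [pvBef] at h; unfold pvLe; omega

theorem mem_insertBy_pv {z x : Int × Int} : ∀ {ys : List (Int × Int)},
    z ∈ PySem.List.insertBy pvBef x ys → z = x ∨ z ∈ ys := by
  intro ys
  induction ys with
  | nil => simp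
  | cons y ys ih =>
    rw [insertBy_cons]
    by_cases hb : pvBef x y = true
    · rw [if_pos hb]; intro h
      rcases List.mem_cons.mp h with rfl | h
      · exact .inl rfl
      · exact .inr h
    · rw [if_neg hb]; intro h
      rcases List.mem_cons.mp h with rfl | h
      · exact .inr (.head _)
      · rcases ih h with rfl | h2
        · exact .inl rfl
        · exact .inr (.tail _ h2)

theorem pairwise_insertBy_pv (x : Int × Int) (ys : List (Int × Int))
    (h : ys.Pairwise pvLe) : (PySem.List.insertBy pvBef x ys).Pairwise pvLe := by
  induction ys with
  | nil => simp
  | cons y ys ih =>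
    rw [List.pairwise_cons] at h
    rw [insertBy_cons]
    by_cases hb : pvBef x y = true
    · rw [if_pos hb]
      refine List.Pairwise.cons ?_ (List.Pairwise.cons h.1 h.2)
      intro z hz
      rcases List.mem_cons.mp hz with rfl | hz
      · exact pvBef_le hb
      · exact pvLe_trans (pvBef_le hb) (h.1 z hz)
    · rw [if_neg hb]
      refine List.Pairwise.cons ?_ (ih h.2)
      intro z hz
      rcases mem_insertBy_pv hz with rfl | hz
      · exact pvBef_not_le hb
      · exact h.1 z hz

theorem pairwise_foldl_insertBy_pv (l : List (Int × Int)) :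
    ∀ acc : List (Int × Int), acc.Pairwise pvLe →
      (l.foldl (fun acc x => PySem.List.insertBy pvBef x acc) acc).Pairwise pvLe := by
  induction l with
  | nil => intro acc h; simpa using h
  | cons x xs ih =>
    intro acc h
    simp only [List.foldl_cons]
    exact ih _ (pairwise_insertBy_pv x acc h)

theorem sorted2_pairwise_pv (l : List (Int × Int)) :
    (PySem.List.sorted2 l Prod.fst Prod.snd).Pairwise pvLe := by
  unfold PySem.List.sorted2
  simp only [Bool.false_eq_true, if_false]
  exact pairwise_foldl_insertBy_pv l [] (by simp)

theorem orderRoots_toRoot (x y : Int × Int) :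
    orderRoots (pvToRoot x) (pvToRoot y) =
      if y.1 < x.1 then 1 else if x.1 < y.1 then 2
      else if y.2 < x.2 then 1 else if x.2 < y.2 then 2 else 0 := by
  unfold orderRoots pvToRoot
  simp only [pyGetD_pair_zero, pyGetD_pair_one, gt_iff_lt]

theorem not_mem_of_lt_lex {x y : Int × Int} {s : List (Int × Int)}
    (hs : (x :: s).Pairwise pvLe) (hlt : y.1 < x.1 ∨ (y.1 = x.1 ∧ y.2 < x.2)) : y ∉ x :: s := by
  rw [List.pairwise_cons] at hs
  intro hmem
  rcases List.mem_cons.mp hmem with rfl | hmem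
  · omega
  · have := hs.1 y hmem; unfold pvLe at this; omega

theorem subLoopA_eq (n : List (Int × Int)) : ∀ (s : List (Int × Int)),
    ∀ ts tn : List (List Int), s.Pairwise pvLe → n.Pairwise pvLe →
    subLoopA (s.map pvToRoot) (n.map pvToRoot) ts tn
      = (ts ++ (s.diff n).map pvToRoot, tn ++ (n.diff s).map pvToRoot) := by
  induction n with
  | nil =>
    intro s ts tn _ _
    cases s with
    | nil => simp [subLoopA]
    | cons x s' => simp [subLoopA]
  | cons y n' ihn =>
    intro s
    induction s with
    | nil => intro ts tn _ _; simp [subLoopA]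
    | cons x s' ihs =>
      intro ts tn hs hn
      rw [List.map_cons, List.map_cons, subLoopA]
      rcases lt_trichotomy x.1 y.1 with h1 | h1 | h1
      · -- x strictly before y : tester = 2, x goes to tempSumand
        have ht : orderRoots (pvToRoot x) (pvToRoot y) = 2 := by
          rw [orderRoots_toRoot, if_neg (by omega), if_pos (by omega)]
        simp only [ht]
        rw [if_neg (by norm_num), if_neg (by norm_num)]
        have hx : x ∉ y :: n' := not_mem_of_lt_lex hn (by omega)
        rw [List.cons_diff (a := x) (l₂ := y :: n'), if_neg hx]
        rw [List.diff_cons (l₁ := y :: n') (l₂ := s') (a := x), List.erase_of_not_mem hx]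
        rw [← List.map_cons, ihs _ _ (List.Pairwise.of_cons hs) hn, List.map_cons]
        simp
      · rcases lt_trichotomy x.2 y.2 with h2 | h2 | h2
        · -- same omega, x's power smaller : tester = 2
          have ht : orderRoots (pvToRoot x) (pvToRoot y) = 2 := by
            rw [orderRoots_toRoot, if_neg (by omega), if_neg (by omega),
              if_neg (by omega), if_pos (by omega)]
          simp only [ht]
          rw [if_neg (by norm_num), if_neg (by norm_num)]
          have hx : x ∉ y :: n' := not_mem_of_lt_lex hn (by omega)
          rw [List.cons_diff (a := x) (l₂ := y :: n'), if_neg hx]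
          rw [List.diff_cons (l₁ := y :: n') (l₂ := s') (a := x), List.erase_of_not_mem hx]
          rw [← List.map_cons, ihs _ _ (List.Pairwise.of_cons hs) hn, List.map_cons]
          simp
        · -- equal roots cancel : tester = 0
          have hxy : x = y := by cases x; cases y; simp_all
          subst hxy
          have ht : orderRoots (pvToRoot x) (pvToRoot x) = 0 := by
            rw [orderRoots_toRoot, if_neg (by omega), if_neg (by omega),
              if_neg (by omega), if_neg (by omega)]
          simp only [ht]
          rw [if_pos trivial]
          rw [List.cons_diff (a := x) (l₂ := x :: n'), if_pos (.head _), List.erase_cons_head]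
          rw [List.cons_diff (a := x) (l₂ := x :: s'), if_pos (.head _), List.erase_cons_head]
          rw [ihn s' _ _ (List.Pairwise.of_cons hs) (List.Pairwise.of_cons hn)]
        · -- same omega, y's power smaller : tester = 1
          have ht : orderRoots (pvToRoot x) (pvToRoot y) = 1 := by
            rw [orderRoots_toRoot, if_neg (by omega), if_neg (by omega), if_pos (by omega)]
          simp only [ht]
          rw [if_neg (by norm_num), if_pos trivial]
          have hy : y ∉ x :: s' := not_mem_of_lt_lex hs (by omega)
          rw [List.diff_cons (l₁ := x :: s') (l₂ := n') (a := y), List.erase_of_not_mem hy]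
          rw [List.cons_diff (a := y) (l₂ := x :: s'), if_neg hy]
          rw [← List.map_cons, ihn _ _ _ hs (List.Pairwise.of_cons hn), List.map_cons]
          simp
      · -- y strictly before x : tester = 1, y goes to tempNegand
        have ht : orderRoots (pvToRoot x) (pvToRoot y) = 1 := by
          rw [orderRoots_toRoot, if_pos (by omega)]
        simp only [ht]
        rw [if_neg (by norm_num), if_pos trivial]
        have hy : y ∉ x :: s' := not_mem_of_lt_lex hs (by omega)
        rw [List.diff_cons (l₁ := x :: s') (l₂ := n') (a := y), List.erase_of_not_mem hy]
        rw [List.cons_diff (a := y) (l₂ := x :: s'), if_neg hy]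
        rw [← List.map_cons, ihn _ _ _ hs (List.Pairwise.of_cons hn), List.map_cons]
        simp

theorem bLoop_eq (s : List (Int × Int)) : ∀ rem left : List (Int × Int),
    s.foldl (fun (st : List (Int × Int) × List (Int × Int)) x =>
        if st.1.contains x then (st.1.erase x, st.2) else (st.1, st.2 ++ [x])) (rem, left)
      = (rem.diff s, left ++ s.diff rem) := by
  induction s with
  | nil => intro rem left; simp
  | cons x s' ih =>
    intro rem left
    simp only [List.foldl_cons]
    by_cases hx : x ∈ rem
    · rw [if_pos (by simpa using hx), ih, List.diff_cons,
        List.cons_diff (a := x) (l₂ := rem), if_pos hx]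
    · rw [if_neg (by simpa using hx), ih, List.diff_cons, List.erase_of_not_mem hx,
        List.cons_diff (a := x) (l₂ := rem), if_neg hx]
      simp

theorem rotate_eq (l : List (Int × Int)) :
    rotate (l.map pvToRoot) 2 1
      = l.map (fun q => let q' := altSimp (q.1 * 2) (q.2 * 2 + q.1); [q'.1, q'.2]) := by
  unfold rotate
  rw [List.map_map]
  refine List.map_congr_left ?_
  intro q _
  show multiplyRoots (PySem.List.pyGetD (pvToRoot q) 0 0) (PySem.List.pyGetD (pvToRoot q) 1 0) 2 1 = _
  unfold pvToRoot
  rw [pyGetD_pair_zero q, pyGetD_pair_one q]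
  unfold multiplyRoots
  rw [mul_one, simplifyRoot_eq]
  rfl

-- ===== VERDICT (by name: the statement is the Claim_ definition above) =====
theorem subtractSorous_spec : Claim_equal_subtractSorous := by
  intro S1 S2 _ _
  unfold Spec_subtractSorous subtractSorous subtractSorous_alt
  simp only [ssort_eq]
  rw [subLoopA_eq _ _ [] [] (sorted2_pairwise_pv _) (sorted2_pairwise_pv _)]
  rw [bLoop_eq]
  simp only [List.nil_append]
  rw [rotate_eq]
  simp [pvToRoot]
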